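-- pv_equiv track=rewrite | github.com/4cademy/adventOfCode2023 | day13/day13.py | task2
-- ===== SOURCE A (Python) =====
-- def mirror_here_in_line_with_num_of_differences(line, pos):
--     smudge_count = 0
--     for i in range(1, min(pos, len(line) - pos)+1, 1):
--         char_left = line[pos - i]
--         char_right = line[pos + i - 1]
--         if char_left != char_right:
--             smudge_count += 1
--     return smudge_count
--
-- def vertical_mirror_here_with_num_of_differences(sequence, pos):
--     smudge_count = 0
--     for line in sequence:
--         smudge_count += mirror_here_in_line_with_num_of_differences(line, pos)
--     return smudge_count
--
-- def find_vertical_mirror_with_num_of_differences(sequence):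
--     for i in range(1, len(sequence[0]), 1):
--         if vertical_mirror_here_with_num_of_differences(sequence, i) == 1:
--             return i
--     return None
--
-- def count_differences(string1, string2):
--     return sum(c1 != c2 for c1, c2 in zip(string1, string2))
--
-- def horizontal_mirror_here_with_num_of_differences(sequence, pos):
--     smudge_count = 0
--     for i in range(1, min(pos, len(sequence) - pos)+1, 1):
--         line_above = sequence[pos - i]
--         line_below = sequence[pos + i - 1]
--         if line_above != line_below:
--             smudge_count += count_differences(line_above, line_below)
--     return smudge_count
--
-- def find_horizontal_mirror_with_num_of_differences(sequence):
--     for i in range(1, len(sequence), 1):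
--         if horizontal_mirror_here_with_num_of_differences(sequence, i) == 1:
--             return i
--     return None
--
-- def task2(data):
--     total = 0
--     for section in data:
--         mirror_pos = find_vertical_mirror_with_num_of_differences(section)
--         result = mirror_pos
--         if mirror_pos is None:
--             mirror_pos = find_horizontal_mirror_with_num_of_differences(section)
--             result = mirror_pos * 100
--         total += result
--     return total
-- ===== SOURCE B (Python) =====
-- def first_one(bucket, n):
--     for p in range(1, n):
--         if bucket.get(2 * p - 1, 0) == 1:
--             return p
--     return None
--
--
-- def column_bucket(section):
--     # histogram over anti-diagonals a+b of mismatched character pairs within each row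
--     bucket = {}
--     for line in section:
--         for b in range(len(line)):
--             for a in range(b):
--                 if line[a] != line[b]:
--                     bucket[a + b] = bucket.get(a + b, 0) + 1
--     return bucket
--
--
-- def row_bucket(section):
--     # histogram over anti-diagonals a+b of mismatched characters between row pairs
--     bucket = {}
--     for b in range(len(section)):
--         for a in range(b):
--             for c1, c2 in zip(section[a], section[b]):
--                 if c1 != c2:
--                     bucket[a + b] = bucket.get(a + b, 0) + 1
--     return bucket
--
--
-- def task2(data):
--     total = 0
--     for section in data:
--         v = first_one(column_bucket(section), len(section[0]))
--         if v is not None: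
--             total += v
--         else:
--             total += first_one(row_bucket(section), len(section)) * 100
--     return total
-- ===== Notes on version B (the rewrite author's own statement) =====
-- stated objective: alternative
-- what changed: B replaces A's per-candidate reflected scans (re-walking mirrored index pairs for every split position) by one anti-diagonal histogram per section: every mismatched index pair (a,b) increments a counter keyed by a+b, and the smudge count of split position p is then just bucket.get(2p-1, 0).
import Mathlib
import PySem

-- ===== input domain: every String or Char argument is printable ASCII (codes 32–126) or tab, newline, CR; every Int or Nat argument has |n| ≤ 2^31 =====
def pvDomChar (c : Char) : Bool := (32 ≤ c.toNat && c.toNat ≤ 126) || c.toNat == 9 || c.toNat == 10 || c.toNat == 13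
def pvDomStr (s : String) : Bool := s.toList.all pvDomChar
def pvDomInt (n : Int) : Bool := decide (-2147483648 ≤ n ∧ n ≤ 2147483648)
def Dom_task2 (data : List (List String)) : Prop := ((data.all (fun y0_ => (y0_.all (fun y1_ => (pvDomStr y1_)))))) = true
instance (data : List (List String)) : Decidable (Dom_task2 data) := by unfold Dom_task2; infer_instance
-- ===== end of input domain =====

-- B replaces A's per-candidate reflected scans by one anti-diagonal histogram per section
-- (every mismatched index pair (a,b) bumps key a+b; the smudge count of split p is bucket.get(2p-1,0)):
-- objective 'alternative'.

-- shared control-flow helper: Python's 'for i in l: if f(i): return i' / 'return None'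
def pyFirst (f : Int → Bool) : List Int → Option Int
  | [] => none
  | i :: rest => if f i then some i else pyFirst f rest

-- ===== PORT A =====
def mirrorLineA (line : String) (pos : Int) : Int :=
  (PySem.List.pyRange 1 (min pos (PySem.Str.len line - pos) + 1) 1).foldl
    (fun smudge_count i =>
      -- line[pos-i] / line[pos+i-1]: always in range for i in this loop (IndexError impossible)
      let char_left := PySem.Str.pyGet? line (pos - i)
      let char_right := PySem.Str.pyGet? line (pos + i - 1)
      if char_left ≠ char_right then smudge_count + 1 else smudge_count) 0

def vertHereA (sequence : List String) (pos : Int) : Int :=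
  sequence.foldl (fun smudge_count line => smudge_count + mirrorLineA line pos) 0

def findVertA (sequence : List String) : Option Int :=
  -- sequence[0] raises IndexError on an empty sequence: excluded by Pre_; "" is the port's placeholder there
  pyFirst (fun i => vertHereA sequence i == 1)
    (PySem.List.pyRange 1 (PySem.Str.len (PySem.List.pyGetD sequence 0 "")) 1)

def countDiffA (string1 string2 : String) : Int :=
  ((string1.toList.zip string2.toList).map (fun c => if c.1 ≠ c.2 then (1 : Int) else 0)).sum

def horizHereA (sequence : List String) (pos : Int) : Int :=
  (PySem.List.pyRange 1 (min pos ((sequence.length : Int) - pos) + 1) 1).foldl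
    (fun smudge_count i =>
      -- sequence[pos-i] / sequence[pos+i-1]: always in range for i in this loop
      let line_above := PySem.List.pyGetD sequence (pos - i) ""
      let line_below := PySem.List.pyGetD sequence (pos + i - 1) ""
      if line_above ≠ line_below then smudge_count + countDiffA line_above line_below
      else smudge_count) 0

def findHorizA (sequence : List String) : Option Int :=
  pyFirst (fun i => horizHereA sequence i == 1)
    (PySem.List.pyRange 1 (sequence.length : Int) 1)

def task2 (data : List (List String)) : Int :=
  data.foldl (fun total sec =>
    match findVertA sec with
    | some v => total + v
    | none =>
      -- Python computes mirror_pos * 100; when mirror_pos is None this raises TypeError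
      -- (excluded by Pre_); the port returns 0 * 100 there.
      total + ((findHorizA sec).getD 0) * 100) 0

-- ===== PORT B =====
-- first_one(bucket, n): first p in range(1, n) whose anti-diagonal count is exactly 1
def firstOneB (bucket : PySem.Dict Int Int) (n : Int) : Option Int :=
  pyFirst (fun p => bucket.getD (2 * p - 1) 0 == 1) (PySem.List.pyRange 1 n 1)

-- column_bucket: histogram over anti-diagonals a+b of mismatched character pairs within each row
def colBucketB (sec : List String) : PySem.Dict Int Int :=
  sec.foldl (fun bucket line =>
    (PySem.List.pyRange 0 (PySem.Str.len line) 1).foldl (fun bucket b =>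
      (PySem.List.pyRange 0 b 1).foldl (fun bucket a =>
        if PySem.Str.pyGet? line a ≠ PySem.Str.pyGet? line b then
          bucket.insert (a + b) (bucket.getD (a + b) 0 + 1)
        else bucket) bucket) bucket) PySem.Dict.empty

-- row_bucket: histogram over anti-diagonals a+b of mismatched characters between row pairs
def rowBucketB (sec : List String) : PySem.Dict Int Int :=
  (PySem.List.pyRange 0 (PySem.List.len sec) 1).foldl (fun bucket b =>
    (PySem.List.pyRange 0 b 1).foldl (fun bucket a =>
      ((PySem.List.pyGetD sec a "").toList.zip (PySem.List.pyGetD sec b "").toList).foldl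
        (fun bucket c =>
          if c.1 ≠ c.2 then bucket.insert (a + b) (bucket.getD (a + b) 0 + 1) else bucket)
        bucket) bucket) PySem.Dict.empty

def task2_alt (data : List (List String)) : Int :=
  data.foldl (fun total sec =>
    match firstOneB (colBucketB sec) (PySem.Str.len (PySem.List.pyGetD sec 0 "")) with
    | some v => total + v
    | none =>
      -- first_one(row_bucket(section), len(section)) * 100: None * 100 raises TypeError
      -- (excluded by Pre_); the port returns 0 * 100 there.
      total + ((firstOneB (rowBucketB sec) (PySem.List.len sec)).getD 0) * 100) 0

-- ===== PRECONDITION & SPEC =====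
-- smudge count of a vertical mirror line after column p: per row, compare the reflected halves
def colCnt (sec : List String) (p : Nat) : Nat :=
  (sec.map (fun l =>
    ((l.toList.take p).reverse.zip (l.toList.drop p)).countP (fun c => c.1 ≠ c.2))).sum

-- smudge count of a horizontal mirror line after row p
def rowCnt (sec : List String) (p : Nat) : Nat :=
  (((sec.take p).reverse.zip (sec.drop p)).map
    (fun q => (q.1.toList.zip q.2.toList).countP (fun c => c.1 ≠ c.2))).sum

-- Pre_ excludes exactly the inputs on which the Python A raises: a section that is empty
-- (IndexError on section[0]) or has no split position with exactly one smudge in either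
-- direction (TypeError on None * 100). B raises on exactly the same inputs.
def Pre_task2 (data : List (List String)) : Prop :=
  ∀ sec ∈ data,
    (∃ p < (sec.headD "").toList.length, 1 ≤ p ∧ colCnt sec p = 1) ∨
    (∃ p < sec.length, 1 ≤ p ∧ rowCnt sec p = 1)
instance (data : List (List String)) : Decidable (Pre_task2 data) := by
  unfold Pre_task2; infer_instance

def pvWitness_task2 : List (List String) := [["##", "##", "#."]]

def Spec_task2 (data : List (List String)) (out : Int) : Prop := out = task2_alt data
instance (data : List (List String)) (out : Int) : Decidable (Spec_task2 data out) := by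
  unfold Spec_task2; infer_instance

-- ===== CLAIM (what is proved, stated in full; the proofs are below) =====
def Claim_equal_task2 : Prop :=
  ∀ (data : List (List String)), Dom_task2 data → Pre_task2 data → Spec_task2 data (task2 data)

-- ===== LEMMAS AND PROOFS =====

theorem pyFirst_congr (f g : Int → Bool) (l : List Int) (h : ∀ x ∈ l, f x = g x) :
    pyFirst f l = pyFirst g l := by
  induction l with
  | nil => rfl
  | cons i rest ih =>
    simp only [pyFirst, h i (by simp)]
    rw [ih (fun x hx => h x (by simp [hx]))]

-- the reflected zip at split position q, written by absolute indices
theorem zip_mirror {α : Type} (l : List α) (d : α) (q : Nat) :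
    (l.take q).reverse.zip (l.drop q) =
      (List.range (min q (l.length - q))).map
        (fun k => (l.getD (q - 1 - k) d, l.getD (q + k) d)) := by
  apply List.ext_getElem
  · simp only [List.length_zip, List.length_reverse, List.length_take, List.length_drop,
      List.length_map, List.length_range]
    omega
  · intro k h1 h2
    simp only [List.length_zip, List.length_reverse, List.length_take, List.length_drop] at h1
    have hq : q < l.length := by omega
    have hk : k < min q (l.length - q) := by omega
    simp only [List.getElem_zip, List.getElem_reverse, List.getElem_map, List.getElem_range,
      List.length_take, List.getElem_take, List.getElem_drop]
    rw [List.getD_eq_getElem l d (by omega), List.getD_eq_getElem l d (by omega)]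
    simp only [show min q l.length = q from by omega]

-- a 0/1 Int sum over a list is a countP, cast
theorem sum_ite_eq_countP {α : Type} (l : List α) (p : α → Prop) [DecidablePred p] :
    ((l.map (fun x => if p x then (1 : Int) else 0)).sum) =
      ((l.countP (fun x => decide (p x)) : Nat) : Int) := by
  rw [← PySem.List.sum_map_ite_one_zero (fun x => decide (p x)) l]
  simp

theorem countP_as_sum {α : Type} (l : List α) (p : α → Bool) :
    l.countP p = (l.map (fun x => if p x then 1 else 0)).sum := by
  induction l with
  | nil => rfl
  | cons x xs ih => by_cases h : p x <;> simp [h, ih, Nat.add_comm]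

theorem countDiffA_char (a b : String) :
    countDiffA a b =
      (((a.toList.zip b.toList).countP (fun c => c.1 ≠ c.2) : Nat) : Int) := by
  exact sum_ite_eq_countP (a.toList.zip b.toList) (fun c => c.1 ≠ c.2)

theorem zip_self_map {α : Type} (l : List α) : l.zip l = l.map (fun x => (x, x)) := by
  induction l with
  | nil => rfl
  | cons x xs ih => simp [ih]

theorem countDiffA_self (a : String) : countDiffA a a = 0 := by
  rw [countDiffA_char, zip_self_map]
  simp

-- A's per-line scanner equals the reflected-zip count
theorem mirrorLineA_char (line : String) (q : Nat) :
    mirrorLineA line (q : Int) =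
      ((((line.toList.take q).reverse.zip (line.toList.drop q)).countP
          (fun c => c.1 ≠ c.2) : Nat) : Int) := by
  unfold mirrorLineA
  set l := line.toList with hl
  set m := min q (l.length - q) with hm
  have hmq : m ≤ q := by omega
  have hml : q + m ≤ l.length ∨ m = 0 := by omega
  have hrange : PySem.List.pyRange 1 (min (q : Int) (PySem.Str.len line - q) + 1) 1 =
      (List.range m).map (fun k => ((1 + k : Nat) : Int)) := by
    rw [PySem.List.pyRange_one]
    have h1 : (min (q : Int) (PySem.Str.len line - q) + 1 - 1).toNat = m := by
      simp only [PySem.Str.len_eq, ← hl]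
      omega
    rw [h1]
    apply List.map_congr_left
    intro k _
    push_cast
    ring
  rw [hrange, List.foldl_map]
  show List.foldl (fun acc k =>
      if PySem.Str.pyGet? line ((q : Int) - ((1 + k : Nat) : Int)) ≠
          PySem.Str.pyGet? line ((q : Int) + ((1 + k : Nat) : Int) - 1)
      then acc + 1 else acc) 0 (List.range m) = _
  have hbody : ∀ (acc : Int), ∀ k ∈ List.range m,
      (if PySem.Str.pyGet? line ((q : Int) - ((1 + k : Nat) : Int)) ≠
          PySem.Str.pyGet? line ((q : Int) + ((1 + k : Nat) : Int) - 1)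
       then acc + 1 else acc) =
      acc + (if (l.getD (q - 1 - k) ' ' ≠ l.getD (q + k) ' ') then (1 : Int) else 0) := by
    intro acc k hk
    simp only [List.mem_range] at hk
    have hkq : k < q := by omega
    have hkl : q + k < l.length := by omega
    have e1 : (q : Int) - ((1 + k : Nat) : Int) = ((q - 1 - k : Nat) : Int) := by
      push_cast; omega
    have e2 : (q : Int) + ((1 + k : Nat) : Int) - 1 = ((q + k : Nat) : Int) := by
      push_cast; ring
    simp only [e1, e2, PySem.Str.pyGet?_natCast, ← hl]
    rw [List.getElem?_eq_getElem (by omega), List.getElem?_eq_getElem (by omega),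
      List.getD_eq_getElem l ' ' (by omega), List.getD_eq_getElem l ' ' (by omega)]
    simp only [ne_eq, Option.some.injEq]
    split_ifs <;> simp
  rw [PySem.List.foldl_congr_mem (List.range m)
    (fun acc k =>
      if PySem.Str.pyGet? line ((q : Int) - ((1 + k : Nat) : Int)) ≠
          PySem.Str.pyGet? line ((q : Int) + ((1 + k : Nat) : Int) - 1)
      then acc + 1 else acc)
    (fun acc k => acc + (if (l.getD (q - 1 - k) ' ' ≠ l.getD (q + k) ' ') then (1 : Int) else 0))
    0 hbody]
  rw [PySem.List.foldl_add]
  rw [zip_mirror l ' ' q, sum_ite_eq_countP, List.countP_map]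
  norm_num [← hm, Function.comp_def]

theorem sum_map_cast {α : Type} (l : List α) (f : α → Nat) :
    (l.map (fun x => ((f x : Nat) : Int))).sum = (((l.map f).sum : Nat) : Int) := by
  induction l with
  | nil => rfl
  | cons x xs ih => simp [ih]

-- A's vertical count at position q is colCnt
theorem vertHereA_char (s : List String) (q : Nat) :
    vertHereA s (q : Int) = ((colCnt s q : Nat) : Int) := by
  unfold vertHereA colCnt
  rw [PySem.List.foldl_add, zero_add,
    List.map_congr_left (fun line _ => mirrorLineA_char line q)]
  exact sum_map_cast _ _

-- A's horizontal count at position q is rowCnt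
theorem horizHereA_char (s : List String) (q : Nat) :
    horizHereA s (q : Int) = ((rowCnt s q : Nat) : Int) := by
  unfold horizHereA
  set m := min q (s.length - q) with hm
  have hrange : PySem.List.pyRange 1 (min (q : Int) ((s.length : Int) - q) + 1) 1 =
      (List.range m).map (fun k => ((1 + k : Nat) : Int)) := by
    rw [PySem.List.pyRange_one]
    have h1 : (min (q : Int) ((s.length : Int) - q) + 1 - 1).toNat = m := by omega
    rw [h1]
    apply List.map_congr_left
    intro k _
    push_cast
    ring
  rw [hrange, List.foldl_map]
  show List.foldl (fun acc k =>
      if PySem.List.pyGetD s ((q : Int) - ((1 + k : Nat) : Int)) "" ≠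
          PySem.List.pyGetD s ((q : Int) + ((1 + k : Nat) : Int) - 1) ""
      then acc + countDiffA (PySem.List.pyGetD s ((q : Int) - ((1 + k : Nat) : Int)) "")
        (PySem.List.pyGetD s ((q : Int) + ((1 + k : Nat) : Int) - 1) "")
      else acc) 0 (List.range m) = _
  have hbody : ∀ (acc : Int), ∀ k ∈ List.range m,
      (if PySem.List.pyGetD s ((q : Int) - ((1 + k : Nat) : Int)) "" ≠
          PySem.List.pyGetD s ((q : Int) + ((1 + k : Nat) : Int) - 1) ""
       then acc + countDiffA (PySem.List.pyGetD s ((q : Int) - ((1 + k : Nat) : Int)) "")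
          (PySem.List.pyGetD s ((q : Int) + ((1 + k : Nat) : Int) - 1) "")
       else acc) =
      acc + countDiffA (s.getD (q - 1 - k) "") (s.getD (q + k) "") := by
    intro acc k hk
    simp only [List.mem_range] at hk
    have e1 : (q : Int) - ((1 + k : Nat) : Int) = ((q - 1 - k : Nat) : Int) := by
      push_cast; omega
    have e2 : (q : Int) + ((1 + k : Nat) : Int) - 1 = ((q + k : Nat) : Int) := by
      push_cast; ring
    simp only [e1, e2, PySem.List.pyGetD_natCast]
    split_ifs with h
    · rfl
    · rw [not_ne_iff] at h
      rw [h, countDiffA_self, add_zero]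
  rw [PySem.List.foldl_congr_mem (List.range m)
    (fun acc k =>
      if PySem.List.pyGetD s ((q : Int) - ((1 + k : Nat) : Int)) "" ≠
          PySem.List.pyGetD s ((q : Int) + ((1 + k : Nat) : Int) - 1) ""
      then acc + countDiffA (PySem.List.pyGetD s ((q : Int) - ((1 + k : Nat) : Int)) "")
        (PySem.List.pyGetD s ((q : Int) + ((1 + k : Nat) : Int) - 1) "")
      else acc)
    (fun acc k => acc + countDiffA (s.getD (q - 1 - k) "") (s.getD (q + k) ""))
    0 hbody]
  rw [PySem.List.foldl_add, zero_add]
  unfold rowCnt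
  rw [zip_mirror s "" q, List.map_map, ← hm,
    List.map_congr_left (fun k _ => countDiffA_char (s.getD (q - 1 - k) "") (s.getD (q + k) ""))]
  exact sum_map_cast _ _

-- ---- B-side: the bucket is a counter of a flattened anti-diagonal key list ----

-- the bump step of both bucket-building loops
def bumpB (d : PySem.Dict Int Int) (k : Int) : PySem.Dict Int Int :=
  d.insert k (d.getD k 0 + 1)

theorem getD_bumpFold (l : List Int) (d : PySem.Dict Int Int) (k : Int) :
    (l.foldl bumpB d).getD k 0 = d.getD k 0 + (l.count k : Int) := by
  induction l generalizing d with
  | nil => simp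
  | cons x t ih =>
    rw [List.foldl_cons, ih]
    by_cases hx : k = x
    · subst hx
      simp only [bumpB, PySem.Dict.getD_insert_self, List.count_cons]
      simp
      ring
    · rw [bumpB, PySem.Dict.getD_insert_of_ne _ _ _ hx]
      simp [Ne.symm hx]

theorem foldl_if_bump {α : Type} (c : α → Prop) [DecidablePred c] (key : α → Int)
    (l : List α) (d : PySem.Dict Int Int) :
    l.foldl (fun d x => if c x then bumpB d (key x) else d) d
      = ((l.filter (fun x => decide (c x))).map key).foldl bumpB d := by
  induction l generalizing d with
  | nil => rfl
  | cons x t ih => by_cases h : c x <;> simp [h, ih]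

theorem foldl_foldl_flatMap {α β σ : Type} (g : σ → β → σ) (f : α → List β)
    (l : List α) (s : σ) :
    l.foldl (fun s x => (f x).foldl g s) s = (l.flatMap f).foldl g s := by
  induction l generalizing s with
  | nil => rfl
  | cons x t ih => simp [List.flatMap_cons, List.foldl_append, ih]

theorem count_flatMap {α β : Type} [BEq β] (f : α → List β) (l : List α) (t : β) :
    (l.flatMap f).count t = (l.map (fun x => (f x).count t)).sum := by
  induction l with
  | nil => rfl
  | cons x t' ih => simp [List.flatMap_cons, List.count_append, ih]

-- Nat-side key lists the buckets count
def colKeysLine (l : List Char) : List Nat :=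
  (List.range l.length).flatMap (fun b =>
    ((List.range b).filter (fun a => decide (l.getD a ' ' ≠ l.getD b ' '))).map (fun a => a + b))

def rowKeysN (sec : List String) : List Nat :=
  (List.range sec.length).flatMap (fun b =>
    (List.range b).flatMap (fun a =>
      (((sec.getD a "").toList.zip (sec.getD b "").toList).filter
        (fun c => decide (c.1 ≠ c.2))).map (fun _ => a + b)))

-- the nested bucket-building loops, flattened to one bump-fold over the key list
theorem lineFold_eq (line : String) (d : PySem.Dict Int Int) :
    (PySem.List.pyRange 0 (PySem.Str.len line) 1).foldl (fun bucket b =>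
      (PySem.List.pyRange 0 b 1).foldl (fun bucket a =>
        if PySem.Str.pyGet? line a ≠ PySem.Str.pyGet? line b then
          bucket.insert (a + b) (bucket.getD (a + b) 0 + 1) else bucket) bucket) d
      = ((colKeysLine line.toList).map (fun (n : Nat) => (n : Int))).foldl bumpB d := by
  set l := line.toList with hl
  rw [PySem.Str.len_eq, PySem.List.pyRange_zero_natCast, List.foldl_map]
  rw [colKeysLine, List.map_flatMap, ← foldl_foldl_flatMap]
  apply PySem.List.foldl_congr_mem
  intro acc b hb
  simp only [List.mem_range] at hb
  rw [← hl] at hb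
  rw [PySem.List.pyRange_zero_natCast, List.foldl_map]
  have hbody : ∀ (d' : PySem.Dict Int Int), ∀ a ∈ List.range b,
      (if PySem.Str.pyGet? line ((a : Nat) : Int) ≠ PySem.Str.pyGet? line ((b : Nat) : Int) then
        d'.insert (((a : Nat) : Int) + ((b : Nat) : Int))
          (d'.getD (((a : Nat) : Int) + ((b : Nat) : Int)) 0 + 1) else d')
      = (if l.getD a ' ' ≠ l.getD b ' ' then bumpB d' (((a + b : Nat) : Int)) else d') := by
    intro d' a ha
    simp only [List.mem_range] at ha
    have h1 : PySem.Str.pyGet? line ((a : Nat) : Int) = some (l.getD a ' ') := by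
      rw [PySem.Str.pyGet?_natCast, ← hl, List.getElem?_eq_getElem (by omega),
        List.getD_eq_getElem l ' ' (by omega)]
    have h2 : PySem.Str.pyGet? line ((b : Nat) : Int) = some (l.getD b ' ') := by
      rw [PySem.Str.pyGet?_natCast, ← hl, List.getElem?_eq_getElem (by omega),
        List.getD_eq_getElem l ' ' (by omega)]
    have hkey : ((a : Nat) : Int) + ((b : Nat) : Int) = ((a + b : Nat) : Int) := by
      push_cast; ring
    rw [h1, h2, hkey]
    unfold bumpB
    simp only [ne_eq, Option.some.injEq]
  rw [PySem.List.foldl_congr_mem _ _ _ acc hbody]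
  rw [foldl_if_bump (fun a => l.getD a ' ' ≠ l.getD b ' ') (fun a => ((a + b : Nat) : Int))]
  rw [List.map_map]
  rfl

theorem colBucketB_eq (sec : List String) :
    colBucketB sec =
      ((sec.flatMap (fun s => colKeysLine s.toList)).map (fun (n : Nat) => (n : Int))).foldl
        bumpB PySem.Dict.empty := by
  unfold colBucketB
  rw [List.map_flatMap, ← foldl_foldl_flatMap]
  exact PySem.List.foldl_congr_mem _ _ _ _ (fun acc line _ => lineFold_eq line acc)

theorem rowBucketB_eq (sec : List String) :
    rowBucketB sec =
      ((rowKeysN sec).map (fun (n : Nat) => (n : Int))).foldl bumpB PySem.Dict.empty := by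
  unfold rowBucketB
  rw [PySem.List.len_eq, PySem.List.pyRange_zero_natCast, List.foldl_map]
  rw [rowKeysN, List.map_flatMap, ← foldl_foldl_flatMap]
  apply PySem.List.foldl_congr_mem
  intro acc b hb
  rw [PySem.List.pyRange_zero_natCast, List.foldl_map]
  rw [List.map_flatMap, ← foldl_foldl_flatMap]
  apply PySem.List.foldl_congr_mem
  intro acc' a ha
  have hga : PySem.List.pyGetD sec ((a : Nat) : Int) "" = sec.getD a "" :=
    PySem.List.pyGetD_natCast sec a ""
  have hgb : PySem.List.pyGetD sec ((b : Nat) : Int) "" = sec.getD b "" :=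
    PySem.List.pyGetD_natCast sec b ""
  have hkey : ((a : Nat) : Int) + ((b : Nat) : Int) = ((a + b : Nat) : Int) := by
    push_cast; ring
  rw [hga, hgb]
  have hbody : ∀ (d' : PySem.Dict Int Int),
      ∀ c ∈ ((sec.getD a "").toList.zip (sec.getD b "").toList),
      (if c.1 ≠ c.2 then
        d'.insert (((a : Nat) : Int) + ((b : Nat) : Int))
          (d'.getD (((a : Nat) : Int) + ((b : Nat) : Int)) 0 + 1) else d')
      = (if c.1 ≠ c.2 then bumpB d' (((a + b : Nat) : Int)) else d') := by
    intro d' c _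
    rw [hkey]
    rfl
  rw [PySem.List.foldl_congr_mem _ _ _ acc' hbody]
  rw [foldl_if_bump (fun c : Char × Char => c.1 ≠ c.2) (fun _ => ((a + b : Nat) : Int))]
  rw [List.map_map]
  rfl

-- ---- counting the anti-diagonal key 2p-1 recovers A's reflected smudge counts ----

-- single hit: at most one index of range b equals t
theorem sum_range_single (b t : Nat) (v : Nat → Nat) :
    ((List.range b).map (fun a => if a = t then v a else 0)).sum = if t < b then v t else 0 := by
  induction b with
  | zero => simp
  | succ b ih =>
    rw [List.range_succ, List.map_append, List.sum_append, ih]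
    by_cases h : t < b
    · simp [h, Nat.lt_succ_of_lt h, Nat.ne_of_gt h]
    · by_cases h2 : b = t
      · subst h2; simp
      · have : ¬ t < b + 1 := by omega
        simp [h, h2, this]

theorem sum_range_if_lt (m p : Nat) (f : Nat → Nat) :
    ((List.range m).map (fun k => if k < p then f k else 0)).sum
      = ((List.range (min p m)).map f).sum := by
  rcases Nat.le_total m p with h | h
  · rw [Nat.min_eq_right h]
    apply congrArg List.sum
    apply List.map_congr_left
    intro k hk
    simp only [List.mem_range] at hk
    simp [show k < p by omega]
  · rw [Nat.min_eq_left h]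
    have : m = p + (m - p) := by omega
    rw [this, List.range_add, List.map_append, List.sum_append]
    have h2 : ((List.map (fun x => p + x) (List.range (m - p))).map
        (fun k => if k < p then f k else 0)).sum = 0 := by
      rw [List.map_map]
      apply List.sum_eq_zero
      intro x hx
      simp only [List.mem_map, List.mem_range] at hx
      obtain ⟨k, _, rfl⟩ := hx
      simp [show ¬ p + k < p by omega]
    rw [h2, Nat.add_zero]
    apply congrArg List.sum
    apply List.map_congr_left
    intro k hk
    simp only [List.mem_range] at hk
    simp [hk]

-- the anti-diagonal a+b = 2p-1 inside [0,n), re-indexed as reflected pairs (p-1-k, p+k)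
theorem antidiag (w : Nat → Nat → Nat) (n p : Nat) (hp : 1 ≤ p) :
    ((List.range n).map (fun b =>
        ((List.range b).map (fun a => if a + b = 2 * p - 1 then w a b else 0)).sum)).sum
      = ((List.range (min p (n - p))).map (fun k => w (p - 1 - k) (p + k))).sum := by
  have hsingle : ∀ b : Nat,
      ((List.range b).map (fun a => if a + b = 2 * p - 1 then w a b else 0)).sum
        = if p ≤ b ∧ b ≤ 2 * p - 1 then w (2 * p - 1 - b) b else 0 := by
    intro b
    by_cases hb : b ≤ 2 * p - 1
    · have hcongr : ∀ a ∈ List.range b,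
          (if a + b = 2 * p - 1 then w a b else 0)
            = (if a = 2 * p - 1 - b then w (2 * p - 1 - b) b else 0) := by
        intro a _
        by_cases ha : a + b = 2 * p - 1
        · rw [if_pos ha, if_pos (by omega), show 2 * p - 1 - b = a by omega]
        · rw [if_neg ha, if_neg (by omega)]
      rw [List.map_congr_left hcongr, sum_range_single]
      have hiff : 2 * p - 1 - b < b ↔ p ≤ b := by omega
      by_cases hpb : p ≤ b
      · simp [hiff.mpr hpb, hpb, hb]
      · simp [show ¬ (2 * p - 1 - b < b) by omega, hpb]
    · have hz : ∀ a ∈ List.range b, (if a + b = 2 * p - 1 then w a b else 0) = 0 := by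
        intro a ha
        simp only [List.mem_range] at ha
        rw [if_neg (by omega)]
      rw [List.map_congr_left hz, if_neg (by omega)]
      simp
  rw [List.map_congr_left (fun b _ => hsingle b)]
  rcases Nat.le_total n p with h | h
  · have h0 : n - p = 0 := by omega
    rw [h0, Nat.min_eq_right (Nat.zero_le _)]
    simp only [List.range_zero, List.map_nil, List.sum_nil]
    apply List.sum_eq_zero
    intro x hx
    simp only [List.mem_map, List.mem_range] at hx
    obtain ⟨b, hb, rfl⟩ := hx
    rw [if_neg (by omega)]
  · have hn : n = p + (n - p) := by omega
    rw [hn, List.range_add, List.map_append, List.sum_append]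
    have h1 : ((List.range p).map
        (fun b => if p ≤ b ∧ b ≤ 2 * p - 1 then w (2 * p - 1 - b) b else 0)).sum = 0 := by
      apply List.sum_eq_zero
      intro x hx
      simp only [List.mem_map, List.mem_range] at hx
      obtain ⟨b, hb, rfl⟩ := hx
      rw [if_neg (by omega)]
    rw [h1, Nat.zero_add, List.map_map]
    have h2 : ∀ k ∈ List.range (n - p),
        ((fun b => if p ≤ b ∧ b ≤ 2 * p - 1 then w (2 * p - 1 - b) b else 0) ∘
          (fun x => p + x)) k
          = if k < p then w (p - 1 - k) (p + k) else 0 := by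
      intro k _
      simp only [Function.comp_def]
      by_cases hk : k < p
      · rw [if_pos (by omega), if_pos hk, show 2 * p - 1 - (p + k) = p - 1 - k by omega]
      · rw [if_neg (by omega), if_neg hk]
    rw [List.map_congr_left h2, sum_range_if_lt, Nat.add_sub_cancel_left]

theorem reflected_countP (l : List Char) (p : Nat) :
    ((l.take p).reverse.zip (l.drop p)).countP (fun c => c.1 ≠ c.2)
      = ((List.range (min p (l.length - p))).map
          (fun k => if l.getD (p - 1 - k) ' ' ≠ l.getD (p + k) ' ' then 1 else 0)).sum := by
  rw [zip_mirror l ' ' p, List.countP_map, countP_as_sum]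
  simp

theorem count_colKeysLine (l : List Char) (p : Nat) (hp : 1 ≤ p) :
    (colKeysLine l).count (2 * p - 1) =
      ((l.take p).reverse.zip (l.drop p)).countP (fun c => c.1 ≠ c.2) := by
  rw [reflected_countP, colKeysLine, count_flatMap]
  rw [← antidiag (fun a b => if l.getD a ' ' ≠ l.getD b ' ' then 1 else 0) l.length p hp]
  apply congrArg List.sum
  apply List.map_congr_left
  intro b _
  rw [List.count_eq_countP, List.countP_map, List.countP_filter, countP_as_sum]
  apply congrArg List.sum
  apply List.map_congr_left
  intro a _
  simp only [Function.comp_def]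
  by_cases h1 : a + b = 2 * p - 1 <;> simp [h1]

theorem rowCnt_eq (sec : List String) (p : Nat) :
    rowCnt sec p = ((List.range (min p (sec.length - p))).map
      (fun k => ((sec.getD (p - 1 - k) "").toList.zip
        ((sec.getD (p + k) "").toList)).countP (fun c => c.1 ≠ c.2))).sum := by
  unfold rowCnt
  rw [zip_mirror sec "" p, List.map_map]
  rfl

theorem count_rowKeysN (sec : List String) (p : Nat) (hp : 1 ≤ p) :
    (rowKeysN sec).count (2 * p - 1) = rowCnt sec p := by
  rw [rowCnt_eq, rowKeysN, count_flatMap]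
  rw [← antidiag (fun a b => ((sec.getD a "").toList.zip
      (sec.getD b "").toList).countP (fun c => c.1 ≠ c.2)) sec.length p hp]
  apply congrArg List.sum
  apply List.map_congr_left
  intro b _
  rw [count_flatMap]
  apply congrArg List.sum
  apply List.map_congr_left
  intro a _
  rw [List.count_eq_countP, List.countP_map]
  by_cases h1 : a + b = 2 * p - 1
  · simp only [h1, Function.comp_def, beq_self_eq_true, List.countP_true]
    exact List.countP_eq_length_filter.symm
  · simp [Function.comp_def, h1]

theorem colBucketB_getD (sec : List String) (p : Nat) (hp : 1 ≤ p) :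
    (colBucketB sec).getD (2 * (p : Int) - 1) 0 = ((colCnt sec p : Nat) : Int) := by
  rw [colBucketB_eq, getD_bumpFold]
  have h0 : (PySem.Dict.empty : PySem.Dict Int Int).getD (2 * (p : Int) - 1) 0 = 0 := by simp
  rw [h0, zero_add]
  have hkey : 2 * (p : Int) - 1 = ((2 * p - 1 : Nat) : Int) := by omega
  rw [hkey, List.count_map_of_injective _ _ (fun x y h => by exact_mod_cast h)]
  rw [count_flatMap]
  have hsum : (sec.map (fun x => (colKeysLine x.toList).count (2 * p - 1))).sum
      = colCnt sec p := by
    unfold colCnt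
    apply congrArg List.sum
    apply List.map_congr_left
    intro s _
    exact count_colKeysLine s.toList p hp
  rw [hsum]

theorem rowBucketB_getD (sec : List String) (p : Nat) (hp : 1 ≤ p) :
    (rowBucketB sec).getD (2 * (p : Int) - 1) 0 = ((rowCnt sec p : Nat) : Int) := by
  rw [rowBucketB_eq, getD_bumpFold]
  have h0 : (PySem.Dict.empty : PySem.Dict Int Int).getD (2 * (p : Int) - 1) 0 = 0 := by simp
  rw [h0, zero_add]
  have hkey : 2 * (p : Int) - 1 = ((2 * p - 1 : Nat) : Int) := by omega
  rw [hkey, List.count_map_of_injective _ _ (fun x y h => by exact_mod_cast h)]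
  rw [count_rowKeysN sec p hp]

-- the two scans agree on every section (A rescans reflected pairs; B reads the histogram)
theorem findVert_eq (sec : List String) :
    findVertA sec =
      firstOneB (colBucketB sec) (PySem.Str.len (PySem.List.pyGetD sec 0 "")) := by
  unfold findVertA firstOneB
  apply pyFirst_congr
  intro x hx
  rw [PySem.List.mem_pyRange_one] at hx
  obtain ⟨q, rfl⟩ : ∃ q : Nat, x = (q : Int) := ⟨x.toNat, by omega⟩
  have hq : 1 ≤ q := by exact_mod_cast hx.1
  rw [vertHereA_char, colBucketB_getD sec q hq]

theorem findHoriz_eq (sec : List String) :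
    findHorizA sec = firstOneB (rowBucketB sec) (PySem.List.len sec) := by
  unfold findHorizA firstOneB
  rw [PySem.List.len_eq]
  apply pyFirst_congr
  intro x hx
  rw [PySem.List.mem_pyRange_one] at hx
  obtain ⟨q, rfl⟩ : ∃ q : Nat, x = (q : Int) := ⟨x.toNat, by omega⟩
  have hq : 1 ≤ q := by exact_mod_cast hx.1
  rw [horizHereA_char, rowBucketB_getD sec q hq]

-- ===== VERDICT (by name: the statement is the Claim_ definition above) =====
theorem task2_spec : Claim_equal_task2 := by
  intro data _hdom _hpre
  unfold Spec_task2 task2 task2_alt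
  apply PySem.List.foldl_congr_mem
  intro total sec _hs
  rw [findVert_eq sec, findHoriz_eq sec]
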